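-- pv_equiv track=rewrite | github.com/byte-prashant/leet_code | 2245-destroying-asteroids/2245-destroying-asteroids.py | asteroidsDestroyed1
-- ===== SOURCE A (Python) =====
-- from typing import List
--
-- def asteroidsDestroyed1(mass: int, asteroids: List[int]) -> bool:
--     import heapq
--     heapq.heapify(asteroids)
--     for i in range(len(asteroids)):
--         next_asteroid = heapq.heappop(asteroids)
--         if next_asteroid > mass:
--             return False
--         mass += next_asteroid
--     return True
-- ===== SOURCE B (Python) =====
-- from typing import List
--
-- def asteroidsDestroyed1(mass: int, asteroids: List[int]) -> bool:
--     asteroids.sort()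
--     totals = [mass]
--     for a in asteroids:
--         totals.append(totals[-1] + a)
--     return all(a <= t for a, t in zip(asteroids, totals))
-- ===== Notes on version B (the rewrite author's own statement) =====
-- stated objective: alternative
-- what changed: Replaces the heapify-and-repeatedly-pop greedy loop (running mass with early return) by staged passes: one ascending sort, a prefix-sum table of attained masses, and a universal all() check that each asteroid fits the mass accumulated before it.
import Mathlib
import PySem

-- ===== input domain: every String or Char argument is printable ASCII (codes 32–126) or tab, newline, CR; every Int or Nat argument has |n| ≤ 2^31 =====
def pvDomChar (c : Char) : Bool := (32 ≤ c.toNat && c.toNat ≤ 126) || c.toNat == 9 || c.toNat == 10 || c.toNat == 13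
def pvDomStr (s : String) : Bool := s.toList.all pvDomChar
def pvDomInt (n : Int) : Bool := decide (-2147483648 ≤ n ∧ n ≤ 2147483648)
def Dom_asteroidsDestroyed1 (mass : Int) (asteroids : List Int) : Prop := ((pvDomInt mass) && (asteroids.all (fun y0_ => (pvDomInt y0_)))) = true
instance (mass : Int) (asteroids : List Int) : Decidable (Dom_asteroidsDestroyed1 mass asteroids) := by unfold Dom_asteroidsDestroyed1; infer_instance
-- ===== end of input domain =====

-- B replaces A's heap-pop greedy loop by staged passes (ascending sort, prefix-sum table,
-- universal check); equivalence is about the RETURN value: both mutate the argument in place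
-- (A heapifies and pops, B sorts ascending), and the leftover arrangements differ.

-- ===== PORT A =====
-- heapq.heapify rearranges in place; heapq.heappop extracts the minimum (the first minimal
-- element; exact at the value level for int elements, where equal keys are identical values).
-- The for-loop over range(len(asteroids)) with the two library calls is ported step for step:
def pvHeapLoopA (fuel : Nat) (mass : Int) (heap : List Int) : Bool :=
  match fuel with
  | 0 => true
  | n + 1 =>
    match PySem.List.min? heap (fun x => x) with
    | none => true           -- unreachable: fuel = number of remaining elements
    | some nxt =>
      if nxt > mass then false
      else
        match PySem.List.remove? heap nxt with
        | none => true       -- unreachable: nxt ∈ heap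
        | some rest => pvHeapLoopA n (mass + nxt) rest

def asteroidsDestroyed1 (mass : Int) (asteroids : List Int) : Bool :=
  pvHeapLoopA asteroids.length mass asteroids

-- ===== PORT B =====
-- totals = [mass]; for a in asteroids: totals.append(totals[-1] + a)
-- (totals[-1] is the running last element, carried as the first argument)
def pvTotalsB (m : Int) : List Int → List Int
  | [] => [m]
  | a :: t => m :: pvTotalsB (m + a) t

def asteroidsDestroyed1_alt (mass : Int) (asteroids : List Int) : Bool :=
  let s := PySem.List.sorted asteroids (fun x => x) false
  (s.zip (pvTotalsB mass s)).all (fun p => decide (p.1 ≤ p.2))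

-- ===== PRECONDITION & SPEC =====
def Spec_asteroidsDestroyed1 (mass : Int) (asteroids : List Int) (out : Bool) : Prop := out = asteroidsDestroyed1_alt mass asteroids
instance (mass : Int) (asteroids : List Int) (out : Bool) : Decidable (Spec_asteroidsDestroyed1 mass asteroids out) := by unfold Spec_asteroidsDestroyed1; infer_instance

-- ===== CLAIM (what is proved, stated in full; the proofs are below) =====
def Claim_equal_asteroidsDestroyed1 : Prop := ∀ (mass : Int) (asteroids : List Int), Dom_asteroidsDestroyed1 mass asteroids → Spec_asteroidsDestroyed1 mass asteroids (asteroidsDestroyed1 mass asteroids)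

-- ===== LEMMAS AND PROOFS =====

-- mathematical core: the greedy pass over a list
def pvProc (mass : Int) : List Int → Bool
  | [] => true
  | a :: t => if a > mass then false else pvProc (mass + a) t

-- the greedy pass equals B's zip-with-prefix-sums universal check (on any list)
theorem pvProc_eq_zipAll (s : List Int) (mass : Int) :
    pvProc mass s = (s.zip (pvTotalsB mass s)).all (fun p => decide (p.1 ≤ p.2)) := by
  induction s generalizing mass with
  | nil => simp [pvProc, pvTotalsB]
  | cons a t ih =>
      rw [pvProc, pvTotalsB]
      by_cases h : a > mass
      · simp [h, List.all_cons, show ¬ a ≤ mass by omega]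
      · simp [h, List.all_cons, show a ≤ mass by omega, ih]

-- pulling the minimum off the front of the ascending sort
theorem sorted_cons_min (heap : List Int) (m : Int)
    (hmin : PySem.List.min? heap (fun x => x) = some m) :
    PySem.List.sorted heap (fun x => x) false
      = m :: PySem.List.sorted (heap.erase m) (fun x => x) false := by
  have hmem : m ∈ heap := PySem.List.min?_mem hmin
  have hbound : ∀ y ∈ heap, m ≤ y := fun y hy => PySem.List.min?_isMin hmin y hy
  have h1 : List.Pairwise (· ≤ ·) (PySem.List.sorted heap (fun x => x) false) := by
    simpa using PySem.List.sorted_pairwise heap (fun x => x)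
  have h2 : List.Pairwise (· ≤ ·) (m :: PySem.List.sorted (heap.erase m) (fun x => x) false) := by
    refine List.Pairwise.cons ?_ ?_
    · intro b hb
      have : b ∈ heap.erase m := (PySem.List.mem_sorted _ _ _ _).1 hb
      exact hbound b (List.mem_of_mem_erase this)
    · simpa using PySem.List.sorted_pairwise (heap.erase m) (fun x => x)
  have hp : (m :: PySem.List.sorted (heap.erase m) (fun x => x) false).Perm
      (PySem.List.sorted heap (fun x => x) false) := by
    refine List.Perm.trans (List.Perm.cons m (PySem.List.sorted_perm (heap.erase m) (fun x => x) false)) ?_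
    exact List.Perm.trans (List.perm_cons_erase hmem).symm
      (PySem.List.sorted_perm heap (fun x => x) false).symm
  exact (List.Perm.eq_of_pairwise (fun a b _ _ hab hba => le_antisymm hab hba) h2 h1 hp).symm

-- A's min-extraction loop is the greedy pass over the ascending sort
theorem pvHeapLoopA_eq_proc (n : Nat) (heap : List Int) (mass : Int)
    (hn : heap.length = n) :
    pvHeapLoopA n mass heap = pvProc mass (PySem.List.sorted heap (fun x => x) false) := by
  induction n generalizing heap mass with
  | zero =>
      have : heap = [] := List.eq_nil_of_length_eq_zero hn
      subst this; simp [pvHeapLoopA, pvProc, PySem.List.sorted]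
  | succ n ih =>
      have hne : heap ≠ [] := by intro h; subst h; simp at hn
      obtain ⟨m, hm⟩ : ∃ m, PySem.List.min? heap (fun x => x) = some m := by
        cases h : PySem.List.min? heap (fun x => x) with
        | none => exact absurd ((PySem.List.min?_eq_none_iff _ _).1 h) hne
        | some m => exact ⟨m, rfl⟩
      have hmem : m ∈ heap := PySem.List.min?_mem hm
      have hrem : PySem.List.remove? heap m = some (heap.erase m) :=
        PySem.List.remove?_eq_some_erase heap m hmem
      rw [pvHeapLoopA]
      simp only [hm, hrem]
      rw [sorted_cons_min heap m hm, pvProc]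
      by_cases hcmp : m > mass
      · simp [hcmp]
      · simp only [if_neg hcmp]
        exact ih (heap.erase m) (mass + m)
          (by have := List.length_erase_of_mem hmem; omega)

-- ===== VERDICT (by name: the statement is the Claim_ definition above) =====
theorem asteroidsDestroyed1_spec : Claim_equal_asteroidsDestroyed1 := by
  intro mass asteroids _
  show asteroidsDestroyed1 mass asteroids = asteroidsDestroyed1_alt mass asteroids
  rw [asteroidsDestroyed1, asteroidsDestroyed1_alt,
    pvHeapLoopA_eq_proc asteroids.length asteroids mass rfl, pvProc_eq_zipAll]
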